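-- pv_equiv track=rewrite | github.com/nadishancosta/linkedin-learning | Data Structs and Algos/Working/Working.py | maxNumberOfBalancedShipments
-- ===== SOURCE A (Python) =====
-- def maxNumberOfBalancedShipments(weights):
--     numberofships=0
--     n = len(weights)
--     if(n<=1):
--         return 0
--     testarr = [weights[0]]
--     for x in range(1,n):
--         testarr.append(weights[x])
--         if(len(testarr)>1 and testarr[-1]<max(testarr)):
--             numberofships += 1
--             testarr = []
--     return numberofships
-- ===== SOURCE B (Python) =====
-- def maxNumberOfBalancedShipments(weights):
--     count = 0
--     m = None  # running max of the current open shipment, None = empty shipment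
--     for w in weights:
--         if m is None:
--             m = w
--         elif w < m:
--             count += 1
--             m = None
--         else:
--             m = w
--     return count
-- ===== Notes on version B (the rewrite author's own statement) =====
-- stated objective: faster
-- what changed: Replaces the list rebuilt and rescanned with max() on every step by a single pass keeping only the running maximum of the current segment (reset on a count), removing the inner O(n) max scan.
import Mathlib
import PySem

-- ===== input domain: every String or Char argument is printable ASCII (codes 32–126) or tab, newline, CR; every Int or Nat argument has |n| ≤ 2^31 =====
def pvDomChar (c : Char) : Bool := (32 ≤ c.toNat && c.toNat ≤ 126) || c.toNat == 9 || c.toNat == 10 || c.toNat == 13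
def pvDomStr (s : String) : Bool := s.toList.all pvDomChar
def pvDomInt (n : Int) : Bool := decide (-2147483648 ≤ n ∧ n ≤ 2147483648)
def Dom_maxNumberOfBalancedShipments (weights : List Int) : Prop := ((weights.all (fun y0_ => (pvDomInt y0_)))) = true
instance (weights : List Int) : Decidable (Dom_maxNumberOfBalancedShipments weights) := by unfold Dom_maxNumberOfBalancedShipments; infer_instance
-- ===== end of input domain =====

-- B replaces A's per-step list rebuild + max() rescan by a single pass keeping only the
-- running maximum of the current segment (objective: faster, O(n) instead of O(n^2)).

-- ===== PORT A =====
-- one iteration of A's for-loop: append weights[x], test last < max(testarr), maybe reset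
def pvAStep (s : List Int × Int) (w : Int) : List Int × Int :=
  let t := s.1 ++ [w]
  if t.length > 1 ∧ PySem.List.pyGetD t (-1) 0 < (PySem.List.max? t (fun y => y)).getD 0 then
    ([], s.2 + 1)
  else
    (t, s.2)

def maxNumberOfBalancedShipments (weights : List Int) : Int :=
  let n : Int := weights.length
  if n ≤ 1 then 0
  else
    ((PySem.List.pyRange 1 n 1).foldl
      (fun s x => pvAStep s (PySem.List.pyGetD weights x 0))
      ([PySem.List.pyGetD weights 0 0], 0)).2

-- ===== PORT B =====
-- one iteration of B's loop: m = running max of current segment (none = empty segment)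
def pvBStep (s : Option Int × Int) (w : Int) : Option Int × Int :=
  match s.1 with
  | none => (some w, s.2)
  | some m => if w < m then (none, s.2 + 1) else (some w, s.2)

def maxNumberOfBalancedShipments_alt (weights : List Int) : Int :=
  (weights.foldl pvBStep (none, 0)).2

-- ===== PRECONDITION & SPEC =====
def Spec_maxNumberOfBalancedShipments (weights : List Int) (out : Int) : Prop := out = maxNumberOfBalancedShipments_alt weights
instance (weights : List Int) (out : Int) : Decidable (Spec_maxNumberOfBalancedShipments weights out) := by unfold Spec_maxNumberOfBalancedShipments; infer_instance

-- ===== CLAIM (what is proved, stated in full; the proofs are below) =====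
def Claim_equal_maxNumberOfBalancedShipments : Prop := ∀ (weights : List Int), Dom_maxNumberOfBalancedShipments weights → Spec_maxNumberOfBalancedShipments weights (maxNumberOfBalancedShipments weights)

-- ===== LEMMAS AND PROOFS =====

-- the two folds agree when B's state is the (optional) maximum of A's testarr
theorem pvLoop_eq (l : List Int) : ∀ (t : List Int) (c : Int),
    (l.foldl pvAStep (t, c)).2
      = (l.foldl pvBStep (PySem.List.max? t (fun y => y), c)).2 := by
  induction l with
  | nil => intro t c; rfl
  | cons w l ih =>
    intro t c
    cases t with
    | nil =>
      have hA : pvAStep (([] : List Int), c) w = ([w], c) := by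
        simp [pvAStep]
      have hB : pvBStep (PySem.List.max? ([] : List Int) (fun y => y), c) w = (some w, c) := rfl
      have hw : (some w : Option Int) = PySem.List.max? [w] (fun y => y) := by
        rw [PySem.List.max?_id_cons]; rfl
      rw [List.foldl_cons, List.foldl_cons, hA, hB, hw, ih]
    | cons x t' =>
      have hmaxc : PySem.List.max? (x :: t') (fun y => y) = some (t'.foldl max x) :=
        PySem.List.max?_id_cons ..
      have hmax : PySem.List.max? ((x :: t') ++ [w]) (fun y => y)
          = some (max (t'.foldl max x) w) := by
        show PySem.List.max? (x :: (t' ++ [w])) (fun y => y) = _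
        rw [PySem.List.max?_id_cons, List.foldl_append]
        rfl
      have hlast : PySem.List.pyGetD ((x :: t') ++ [w]) (-1) 0 = w :=
        PySem.List.pyGetD_neg_one_append_singleton ..
      have hlen : ((x :: t') ++ [w]).length > 1 := by simp
      by_cases h : w < t'.foldl max x
      · have hA : pvAStep ((x :: t'), c) w = ([], c + 1) := by
          simp only [pvAStep]
          rw [if_pos ⟨hlen, by rw [hlast, hmax]; exact lt_max_of_lt_left h⟩]
        have hB : pvBStep (PySem.List.max? (x :: t') (fun y => y), c) w = (none, c + 1) := by
          rw [hmaxc]; simp [pvBStep, h]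
        have hnil : (none : Option Int) = PySem.List.max? ([] : List Int) (fun y => y) := rfl
        rw [List.foldl_cons, List.foldl_cons, hA, hB, hnil, ih]
      · have hA : pvAStep ((x :: t'), c) w = ((x :: t') ++ [w], c) := by
          simp only [pvAStep]
          rw [if_neg]
          rintro ⟨-, hc⟩
          rw [hlast, hmax] at hc
          simp only [Option.getD_some, lt_max_iff] at hc
          rcases hc with hc | hc
          · exact h hc
          · exact lt_irrefl _ hc
        have hB : pvBStep (PySem.List.max? (x :: t') (fun y => y), c) w = (some w, c) := by
          rw [hmaxc]; simp [pvBStep, h]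
        have hmw : max (t'.foldl max x) w = w := max_eq_right (not_lt.mp h)
        rw [List.foldl_cons, List.foldl_cons, hA, hB, ih, hmax, hmw]

theorem maxNumberOfBalancedShipments_spec : Claim_equal_maxNumberOfBalancedShipments := by
  intro weights _
  show maxNumberOfBalancedShipments weights = maxNumberOfBalancedShipments_alt weights
  unfold maxNumberOfBalancedShipments maxNumberOfBalancedShipments_alt
  by_cases hle : (weights.length : Int) ≤ 1
  · rw [if_pos hle]
    match weights, hle with
    | [], _ => rfl
    | [a], _ => rfl
  · rw [if_neg hle]
    match weights, hle with
    | w0 :: rest, hle =>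
      have hdrop := PySem.List.foldl_pyRange_pyGetD' (w0 :: rest) 0 pvAStep
        ([PySem.List.pyGetD (w0 :: rest) 0 0], 0) (a := 1) (by omega)
      rw [hdrop]
      have h0 : PySem.List.pyGetD (w0 :: rest) 0 0 = w0 := PySem.List.pyGetD_zero_cons ..
      have hd : (w0 :: rest).drop (1 : Int).toNat = rest := rfl
      rw [h0, hd, pvLoop_eq]
      have hm : PySem.List.max? [w0] (fun y => y) = some w0 := by
        rw [PySem.List.max?_id_cons]; rfl
      rw [hm, List.foldl_cons]
      rfl

-- ===== VERDICT was proved directly above under the pinned name =====
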